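-- pv_equiv track=rewrite | github.com/10percentmonday/linux-tools | PY/tellpass.py | distinguish_char
-- ===== SOURCE A (Python) =====
-- def distinguish_char(input_string):
--     char_map = {
--         'l': 'lowercase L',
--         '1': 'digit 1',
--         'i': 'lowercase I',
--         'I': 'capital I',
--         'o': 'lowercase O',
--         'O': 'capital O',
--         '0': 'digit 0',
--         'k': 'lowercase K',
--         'K': 'capital K'
--     }
--
--     result = []
--     for char in input_string:
--         if char in char_map:
--             result.append(f"{char}[{char_map[char]}]")
--         else:
--             result.append(char)
--     return''.join(result)
-- ===== SOURCE B (Python) =====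
-- # Alternative algorithm: divide and conquer. Annotation is a homomorphism over
-- # concatenation, so split the string in half, annotate each half recursively
-- # (recursion depth O(log n)), and concatenate; a length-1 string is annotated
-- # by a direct table lookup.
-- _CHAR_MAP = {
--     'l': 'lowercase L',
--     '1': 'digit 1',
--     'i': 'lowercase I',
--     'I': 'capital I',
--     'o': 'lowercase O',
--     'O': 'capital O',
--     '0': 'digit 0',
--     'k': 'lowercase K',
--     'K': 'capital K'
-- }
-- _ANN = {c: f"{c}[{d}]" for c, d in _CHAR_MAP.items()}
--
-- def distinguish_char(input_string):
--     n = len(input_string)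
--     if n <= 1:
--         return _ANN.get(input_string, input_string)
--     mid = n // 2
--     return distinguish_char(input_string[:mid]) + distinguish_char(input_string[mid:])
-- ===== Notes on version B (the rewrite author's own statement) =====
-- stated objective: alternative
-- what changed: Replaces the left-to-right per-character accumulator loop by a divide-and-conquer recursion: split the string in half, annotate each half independently, concatenate (correct because annotation is a concatenation homomorphism); length-1 strings are annotated by one table lookup.
import Mathlib
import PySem

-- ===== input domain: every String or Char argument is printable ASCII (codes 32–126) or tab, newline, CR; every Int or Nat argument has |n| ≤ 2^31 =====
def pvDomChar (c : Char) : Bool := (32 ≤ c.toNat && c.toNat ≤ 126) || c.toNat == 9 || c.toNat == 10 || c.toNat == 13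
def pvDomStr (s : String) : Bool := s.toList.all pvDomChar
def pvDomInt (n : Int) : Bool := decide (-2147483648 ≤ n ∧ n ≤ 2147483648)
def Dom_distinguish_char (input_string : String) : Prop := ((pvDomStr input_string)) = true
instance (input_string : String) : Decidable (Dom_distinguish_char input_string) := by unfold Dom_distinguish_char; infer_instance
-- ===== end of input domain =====

-- B replaces A's per-character accumulator loop by a divide-and-conquer recursion
-- (split in half, annotate halves, concatenate); alternative algorithm, same result.

-- ===== PORT A =====
def distinguish_char (input_string : String) : String :=
  let char_map : PySem.Dict Char String := PySem.Dict.ofList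
    [('l', "lowercase L"), ('1', "digit 1"), ('i', "lowercase I"), ('I', "capital I"),
     ('o', "lowercase O"), ('O', "capital O"), ('0', "digit 0"), ('k', "lowercase K"),
     ('K', "capital K")]
  let result : List String := input_string.toList.foldl (fun acc char =>
    if char_map.contains char then
      acc ++ [String.mk [char] ++ "[" ++ (char_map.getD char "") ++ "]"]
    else
      acc ++ [String.mk [char]]) []
  String.join result

-- ===== PORT B =====
-- Source B's precomputed _ANN table: one-char string ↦ its annotated form.
def pvAnnDict : PySem.Dict Char String := PySem.Dict.ofList
  [('l', "l[lowercase L]"), ('1', "1[digit 1]"), ('i', "i[lowercase I]"), ('I', "I[capital I]"),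
   ('o', "o[lowercase O]"), ('O', "O[capital O]"), ('0', "0[digit 0]"), ('k', "k[lowercase K]"),
   ('K', "K[capital K]")]

-- Source B's recursion, over the character list; n // 2 on a length n ≥ 2 is Nat division
-- (exact for Python '//' on nonnegative operands); slices s[:mid] / s[mid:] are take / drop.
def pvAltGo (l : List Char) : List Char :=
  if l.length ≤ 1 then
    match l with
    | [] => []
    | c :: _ => (pvAnnDict.getD c (String.mk [c])).toList
  else
    pvAltGo (l.take (l.length / 2)) ++ pvAltGo (l.drop (l.length / 2))
termination_by l.length
decreasing_by
  · simp only [List.length_take]; omega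
  · simp only [List.length_drop]; omega

def distinguish_char_alt (input_string : String) : String :=
  String.mk (pvAltGo input_string.toList)

-- ===== PRECONDITION & SPEC =====
def Spec_distinguish_char (input_string : String) (out : String) : Prop := out = distinguish_char_alt input_string
instance (input_string : String) (out : String) : Decidable (Spec_distinguish_char input_string out) := by unfold Spec_distinguish_char; infer_instance

-- ===== CLAIM (what is proved, stated in full; the proofs are below) =====
def Claim_equal_distinguish_char : Prop := ∀ (input_string : String), Dom_distinguish_char input_string → Spec_distinguish_char input_string (distinguish_char input_string)

-- ===== LEMMAS AND PROOFS =====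

-- A's dictionary, named for the proofs (definitionally the literal in A's port).
def pvCharMap : PySem.Dict Char String := PySem.Dict.ofList
  [('l', "lowercase L"), ('1', "digit 1"), ('i', "lowercase I"), ('I', "capital I"),
   ('o', "lowercase O"), ('O', "capital O"), ('0', "digit 0"), ('k', "lowercase K"),
   ('K', "capital K")]

-- A's loop body, per character.
def pvAStep (char : Char) : String :=
  if pvCharMap.contains char then
    String.mk [char] ++ "[" ++ (pvCharMap.getD char "") ++ "]"
  else
    String.mk [char]

-- the common per-character annotation, as a character list
def pvAnnList (c : Char) : List Char := (pvAnnDict.getD c (String.mk [c])).toList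

lemma foldl_if_append {α β : Type} (p : α → Bool) (f g : α → β) (l : List α) (acc : List β) :
    l.foldl (fun a x => if p x then a ++ [f x] else a ++ [g x]) acc
      = acc ++ l.map (fun x => if p x then f x else g x) := by
  induction l generalizing acc with
  | nil => simp
  | cons x xs ih => by_cases hp : p x <;> simp [List.foldl, hp, ih]

lemma perChar (c : Char) : (pvAStep c).toList = pvAnnList c := by
  by_cases h : c = 'l' ∨ c = '1' ∨ c = 'i' ∨ c = 'I' ∨ c = 'o' ∨ c = 'O' ∨ c = '0' ∨ c = 'k' ∨ c = 'K'
  · rcases h with h|h|h|h|h|h|h|h|h <;> subst h <;> decide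
  · push Not at h
    obtain ⟨h1, h2, h3, h4, h5, h6, h7, h8, h9⟩ := h
    simp [pvAStep, pvAnnList, pvCharMap, pvAnnDict, PySem.Dict.ofList, PySem.Dict.update,
      PySem.Dict.contains_insert, PySem.Dict.contains_empty,
      PySem.Dict.getD_insert, PySem.Dict.getD_empty,
      h1, h2, h3, h4, h5, h6, h7, h8, h9]

lemma altGo_eq (l : List Char) : pvAltGo l = l.flatMap pvAnnList := by
  induction l using pvAltGo.induct with
  | case1 hle => rw [pvAltGo]; simp
  | case2 c cs hle =>
      cases cs with
      | nil => rw [pvAltGo]; simp [pvAnnList]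
      | cons d ds => simp at hle
  | case3 l hgt ih1 ih2 =>
      rw [pvAltGo.eq_def]; simp only [hgt, if_false]
      rw [ih1, ih2, ← List.flatMap_append, List.take_append_drop]

lemma join_toList_aux (l : List String) (s : String) :
    (l.foldl (fun r x => r ++ x) s).toList = s.toList ++ (l.map String.toList).flatten := by
  induction l generalizing s with
  | nil => simp
  | cons x xs ih => simp [List.foldl, ih]

lemma join_toList (l : List String) :
    (String.join l).toList = (l.map String.toList).flatten := by
  simpa using join_toList_aux l ""

-- ===== VERDICT (by name: the statement is the Claim_ definition above) =====
theorem distinguish_char_spec : Claim_equal_distinguish_char := by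
  intro s _
  show String.join (s.toList.foldl (fun acc char =>
      if pvCharMap.contains char then
        acc ++ [String.mk [char] ++ "[" ++ (pvCharMap.getD char "") ++ "]"]
      else
        acc ++ [String.mk [char]]) []) = distinguish_char_alt s
  rw [foldl_if_append (fun char => pvCharMap.contains char)
      (fun char => String.mk [char] ++ "[" ++ (pvCharMap.getD char "") ++ "]")
      (fun char => String.mk [char])]
  have hstep : (fun x => if pvCharMap.contains x then
        String.mk [x] ++ "[" ++ (pvCharMap.getD x "") ++ "]" else String.mk [x]) = pvAStep := by
    funext x; rfl
  rw [hstep]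
  apply String.ext
  rw [join_toList]
  show _ = (String.mk (pvAltGo s.toList)).toList
  rw [altGo_eq]
  simp only [List.nil_append, List.map_map, Function.comp_def, perChar, List.flatMap_def]
  exact String.toList_ofList.symm
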